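-- pv_equiv track=rewrite | github.com/ludwings0330/algo | codeforce/211029_div2/B_Update_Files.py | solve
-- ===== SOURCE A (Python) =====
-- cache = [pow(2, i) for i in range(60)]
--
-- def solve(n, k):
--     ret = 0
--
--     s = 0
--     while 2**s <= k:
--         ret += 1
--         n -= cache[s]
--         s += 1
--
--     ret += n//k
--     if n % k != 0:
--         ret += 1
--
--     return ret
-- ===== SOURCE B (Python) =====
-- def solve(n, k):
--     count = max(k, 0).bit_length()
--     n -= (1 << count) - 1
--     steps = count + n // k
--     if n % k != 0:
--         steps += 1
--     return steps
-- ===== Notes on version B (the rewrite author's own statement) =====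
-- stated objective: simpler
-- what changed: The while-loop that counts powers of two and subtracts them one by one is replaced by a closed form: bit_length of max(k,0) gives the step count and the geometric sum (1<<count)-1 is subtracted once.
import Mathlib
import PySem

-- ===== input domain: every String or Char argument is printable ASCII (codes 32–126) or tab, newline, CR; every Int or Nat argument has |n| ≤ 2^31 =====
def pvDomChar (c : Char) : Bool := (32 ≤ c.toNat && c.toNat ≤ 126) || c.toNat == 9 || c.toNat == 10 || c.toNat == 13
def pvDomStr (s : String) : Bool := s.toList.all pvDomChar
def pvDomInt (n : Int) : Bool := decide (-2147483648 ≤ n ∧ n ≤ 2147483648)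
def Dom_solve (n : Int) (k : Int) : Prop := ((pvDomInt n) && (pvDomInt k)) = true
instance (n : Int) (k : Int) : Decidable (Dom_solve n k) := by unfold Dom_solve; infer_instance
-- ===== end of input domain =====

-- B replaces A's while-loop with a closed form: bit_length gives the step count and a
-- geometric sum replaces the repeated subtractions (objective: simpler, no loop).

-- ===== PORT A =====
-- while 2**s <= k: ret += 1; n -= cache[s]; s += 1.  cache = [2**i for i in range(60)],
-- so cache[s] = 2^s and the fuel is 60 = len(cache); beyond it Python would raise
-- IndexError, which is unreachable inside Dom (|k| ≤ 2^31) and excluded by no claim.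
def solveLoop (fuel : Nat) (s : Nat) (k : Int) (ret : Int) (n : Int) : Int × Int :=
  match fuel with
  | 0 => (ret, n)
  | f + 1 =>
    if (2 : Int) ^ s ≤ k then solveLoop f (s + 1) k (ret + 1) (n - (2 : Int) ^ s)
    else (ret, n)

def solve (n : Int) (k : Int) : Int :=
  let p := solveLoop 60 0 k 0 n
  let ret := p.1 + PySem.Int.floordiv p.2 k
  if PySem.Int.mod p.2 k ≠ 0 then ret + 1 else ret

-- ===== PORT B =====
def solve_alt (n : Int) (k : Int) : Int :=
  let count : Nat := PySem.Int.bitLength (max k 0)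
  let n' := n - ((2 : Int) ^ count - 1)
  let steps := (count : Int) + PySem.Int.floordiv n' k
  if PySem.Int.mod n' k ≠ 0 then steps + 1 else steps

-- ===== PRECONDITION & SPEC =====
-- Pre_ excludes exactly k = 0, where Python's n // k raises ZeroDivisionError.
def Pre_solve (n : Int) (k : Int) : Prop := k ≠ 0
instance (n : Int) (k : Int) : Decidable (Pre_solve n k) := by unfold Pre_solve; infer_instance
def pvWitness_solve : Int × Int := (10, 3)

def Spec_solve (n : Int) (k : Int) (out : Int) : Prop := out = solve_alt n k
instance (n : Int) (k : Int) (out : Int) : Decidable (Spec_solve n k out) := by unfold Spec_solve; infer_instance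

-- ===== CLAIM (what is proved, stated in full; the proofs are below) =====
def Claim_equal_solve : Prop := ∀ (n : Int) (k : Int), Dom_solve n k → Pre_solve n k → Spec_solve n k (solve n k)

-- ===== LEMMAS AND PROOFS =====

-- 2^s ≤ k exactly when s is below the bit length of max(k,0)
lemma pow_le_iff_lt_bitLength (k : Int) (s : Nat) :
    ((2 : Int) ^ s ≤ k) ↔ s < PySem.Int.bitLength (max k 0) := by
  by_cases hk : k ≤ 0
  · have hmax : max k 0 = 0 := by omega
    rw [hmax]
    simp only [PySem.Int.bitLength_zero]
    constructor
    · intro h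
      have : (0 : Int) < 2 ^ s := by positivity
      omega
    · omega
  · have hmax : max k 0 = k := by omega
    rw [hmax]
    have habs : (k.natAbs : Int) = k := Int.natAbs_of_nonneg (by omega)
    set c := PySem.Int.bitLength k with hc
    have hne : k ≠ 0 := by omega
    have hk' : 0 < k := by omega
    have h1 : k.natAbs < 2 ^ c := PySem.Int.lt_two_pow_bitLength k
    have h2 : 2 ^ (c - 1) ≤ k.natAbs := PySem.Int.two_pow_bitLength_le k hne
    have hcpos : 0 < c := by
      by_contra h
      have : c = 0 := by omega
      rw [this] at h1
      omega
    constructor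
    · intro h
      by_contra hlt
      have hcs : c ≤ s := by omega
      have : (2 : Nat) ^ c ≤ 2 ^ s := Nat.pow_le_pow_right (by norm_num) hcs
      have hk2 : k < ((2 : Nat) ^ s : Int) := by
        calc k = (k.natAbs : Int) := habs.symm
        _ < ((2 : Nat) ^ c : Int) := by exact_mod_cast h1
        _ ≤ ((2 : Nat) ^ s : Int) := by exact_mod_cast this
      have : (2 : Int) ^ s = ((2 : Nat) ^ s : Int) := by push_cast; ring
      omega
    · intro h
      have hsc : s ≤ c - 1 := by omega
      have : (2 : Nat) ^ s ≤ 2 ^ (c - 1) := Nat.pow_le_pow_right (by norm_num) hsc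
      have h3 : (2 : Nat) ^ s ≤ k.natAbs := le_trans this h2
      have : ((2 : Nat) ^ s : Int) ≤ k := by
        calc ((2 : Nat) ^ s : Int) ≤ (k.natAbs : Int) := by exact_mod_cast h3
        _ = k := habs
      have h4 : (2 : Int) ^ s = ((2 : Nat) ^ s : Int) := by push_cast; ring
      omega

-- the while-loop computes the closed form
lemma solveLoop_eq (k : Int) (fuel s : Nat) (ret n : Int)
    (hs : s ≤ PySem.Int.bitLength (max k 0))
    (hf : PySem.Int.bitLength (max k 0) ≤ s + fuel) :
    solveLoop fuel s k ret n =
      (ret + ((PySem.Int.bitLength (max k 0) : Int) - s),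
       n - ((2 : Int) ^ (PySem.Int.bitLength (max k 0)) - 2 ^ s)) := by
  induction fuel generalizing s ret n with
  | zero =>
    have : s = PySem.Int.bitLength (max k 0) := by omega
    subst this
    simp [solveLoop]
  | succ f ih =>
    rw [solveLoop]
    by_cases h : (2 : Int) ^ s ≤ k
    · have hlt : s < PySem.Int.bitLength (max k 0) := (pow_le_iff_lt_bitLength k s).mp h
      rw [if_pos h, ih (s + 1) (ret + 1) (n - 2 ^ s) (by omega) (by omega)]
      simp only [Prod.mk.injEq]
      constructor <;> (push_cast; ring)
    · have hge : PySem.Int.bitLength (max k 0) ≤ s := by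
        by_contra hc
        exact h ((pow_le_iff_lt_bitLength k s).mpr (by omega))
      have : s = PySem.Int.bitLength (max k 0) := by omega
      subst this
      simp [if_neg h]

-- inside Dom the bit length is at most 32 < 60
lemma bitLength_le_of_dom (k : Int) (hk : k ≤ 2147483648) :
    PySem.Int.bitLength (max k 0) ≤ 60 := by
  by_contra h
  have hne : max k 0 ≠ 0 := by
    by_contra h0
    rw [h0] at h
    simp [PySem.Int.bitLength_zero] at h
  have h2 := PySem.Int.two_pow_bitLength_le (max k 0) hne
  have hpow : (2 : Nat) ^ 60 ≤ 2 ^ (PySem.Int.bitLength (max k 0) - 1) :=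
    Nat.pow_le_pow_right (by norm_num) (by omega)
  have habs : (max k 0).natAbs ≤ 2147483648 := by
    by_cases h1 : k ≤ 0
    · have : max k 0 = 0 := by omega
      simp [this]
    · have : max k 0 = k := by omega
      rw [this]
      omega
  have : (2 : Nat) ^ 60 ≤ 2147483648 := by
    calc (2 : Nat) ^ 60 ≤ 2 ^ (PySem.Int.bitLength (max k 0) - 1) := hpow
    _ ≤ (max k 0).natAbs := h2
    _ ≤ 2147483648 := habs
  norm_num at this

-- ===== VERDICT (by name: the statement is the Claim_ definition above) =====
theorem solve_spec : Claim_equal_solve := by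
  intro n k hdom _hpre
  have hk : k ≤ 2147483648 := by
    unfold Dom_solve pvDomInt at hdom
    simp only [Bool.and_eq_true, decide_eq_true_eq] at hdom
    omega
  have hc := bitLength_le_of_dom k hk
  unfold Spec_solve solve solve_alt
  rw [solveLoop_eq k 60 0 0 n (Nat.zero_le _) (by omega)]
  simp
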